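-- pv_equiv track=rewrite | github.com/ch0c0-msk/YandexAlgorithms | 4.0/Final/taskA.py | findCx
-- ===== SOURCE A (Python) =====
-- def findCx(x):
--     i, j = 1, 1
--     iSq, jCub = 1, 1
--     k = 1
--     while k <= x:
--         if iSq== jCub:
--             i += 1
--             iSq = i*i
--             k -= 1
--         elif iSq < jCub:
--             res = iSq
--             i += 1
--             iSq = i*i
--         else:
--             res = jCub
--             j += 1
--             jCub = j*j*j
--         k += 1
--
--     return res
-- ===== SOURCE B (Python) =====
-- def findCx(x):
--     # Binary search on the value: count(n) = #squares<=n + #cubes<=n - #sixth-powers<=n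
--     # (inclusion-exclusion); the answer is the least n with count(n) >= x.
--     def iroot(n, k):
--         # largest r >= 0 with r**k <= n (n >= 0)
--         lo, hi = 0, n
--         while lo < hi:
--             mid = (lo + hi + 1) // 2
--             if mid ** k <= n:
--                 lo = mid
--             else:
--                 hi = mid - 1
--         return lo
--
--     def count(n):
--         return iroot(n, 2) + iroot(n, 3) - iroot(n, 6)
--
--     lo, hi = 1, x * x
--     while lo < hi:
--         mid = (lo + hi) // 2
--         if count(mid) >= x:
--             hi = mid
--         else:
--             lo = mid + 1
--     return lo
-- ===== Notes on version B (the rewrite author's own statement) =====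
-- stated objective: faster
-- what changed: Replaced A's step-by-step two-pointer merge of the square and cube sequences (O(x) iterations) by a binary search on the answer value using the inclusion-exclusion rank count isqrt(n)+icbrt(n)-isixth(n), each root itself computed by binary search.
-- outside the precondition, e.g. on findCx(0): A raises UnboundLocalError, B returns 1
import Mathlib
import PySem

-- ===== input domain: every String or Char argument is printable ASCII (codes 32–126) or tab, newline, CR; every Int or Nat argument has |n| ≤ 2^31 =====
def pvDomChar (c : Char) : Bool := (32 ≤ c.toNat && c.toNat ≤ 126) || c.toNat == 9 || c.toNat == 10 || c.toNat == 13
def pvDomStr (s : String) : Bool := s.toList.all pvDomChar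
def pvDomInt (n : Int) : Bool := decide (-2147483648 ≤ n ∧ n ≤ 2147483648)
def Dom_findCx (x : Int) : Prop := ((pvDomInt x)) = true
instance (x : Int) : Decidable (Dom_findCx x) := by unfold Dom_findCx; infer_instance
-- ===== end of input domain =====

-- B replaces A's O(x) two-pointer merge of squares and cubes by a binary search on the value
-- using an inclusion-exclusion count isqrt(n)+icbrt(n)-isixth(n) (objective: faster).

-- ===== PORT A =====
-- A's while loop; Python's variables iSq = i*i and jCub = j*j*j are recomputed from i and j
-- (the same values Python carries in its state).
-- A's while loop, guarded by fuel (a pure totality guard: the caller passes enough fuel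
-- for the loop to reach its exit condition, proved in the lemmas below).
def findCxLoop (fuel : Nat) (x i j k res : Int) : Int :=
  match fuel with
  | 0 => res
  | fuel + 1 =>
    if k ≤ x then
      if i*i = j*j*j then
        findCxLoop fuel x (i+1) j k res            -- k -= 1 then k += 1: k unchanged
      else if i*i < j*j*j then
        findCxLoop fuel x (i+1) j (k+1) (i*i)
      else
        findCxLoop fuel x i (j+1) (k+1) (j*j*j)
    else res

-- Python A leaves `res` unassigned before the loop; the port seeds it with 0, which is
-- never returned on Pre_ (x ≥ 1): Python raises UnboundLocalError exactly when x ≤ 0.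
def findCx (x : Int) : Int := findCxLoop (2*(x+1)).toNat x 1 1 1 0

-- ===== PORT B =====
-- iroot's binary search: invariant lo**k <= n < (hi+1)**k
def irootGo (fuel : Nat) (n : Int) (kexp : Nat) (lo hi : Int) : Int :=
  match fuel with
  | 0 => lo
  | fuel + 1 =>
    if lo < hi then
      let mid := PySem.Int.floordiv (lo + hi + 1) 2
      if mid ^ kexp ≤ n then irootGo fuel n kexp mid hi else irootGo fuel n kexp lo (mid - 1)
    else lo

def iroot (n : Int) (kexp : Nat) : Int := irootGo n.toNat n kexp 0 n

def pvCount (n : Int) : Int := iroot n 2 + iroot n 3 - iroot n 6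

-- outer binary search: least n in [lo, hi] with count(n) >= x
def findCxGo (fuel : Nat) (x lo hi : Int) : Int :=
  match fuel with
  | 0 => lo
  | fuel + 1 =>
    if lo < hi then
      let mid := PySem.Int.floordiv (lo + hi) 2
      if x ≤ pvCount mid then findCxGo fuel x lo mid else findCxGo fuel x (mid+1) hi
    else lo

def findCx_alt (x : Int) : Int := findCxGo (x * x - 1).toNat x 1 (x * x)

-- ===== PRECONDITION & SPEC =====
-- Pre_ excludes exactly x ≤ 0, where Python A raises UnboundLocalError (res is never assigned).
def Pre_findCx (x : Int) : Prop := 1 ≤ x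
instance (x : Int) : Decidable (Pre_findCx x) := by unfold Pre_findCx; infer_instance
def pvWitness_findCx : Int := 5

def Spec_findCx (x : Int) (out : Int) : Prop := out = findCx_alt x
instance (x : Int) (out : Int) : Decidable (Spec_findCx x out) := by unfold Spec_findCx; infer_instance

-- ===== CLAIM (what is proved, stated in full; the proofs are below) =====
def Claim_equal_findCx : Prop := ∀ (x : Int), Dom_findCx x → Pre_findCx x → Spec_findCx x (findCx x)

-- ===== LEMMAS AND PROOFS =====

-- membership in the merged sequence: n is a positive perfect square or cube
def inS (n : Int) : Prop := (∃ r : Int, 1 ≤ r ∧ r * r = n) ∨ (∃ s : Int, 1 ≤ s ∧ s * s * s = n)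

lemma inS_one_le {n : Int} (h : inS n) : 1 ≤ n := by
  rcases h with ⟨r, hr, hrn⟩ | ⟨s, hs, hsn⟩
  · nlinarith
  · nlinarith

-- characterization of irootGo's binary search
lemma irootGo_spec (n : Int) (k : Nat) (hk : k ≠ 0) :
    ∀ (fuel : Nat) (lo hi : Int), (hi - lo).toNat ≤ fuel →
    0 ≤ lo → lo ≤ hi → lo ^ k ≤ n → n < (hi + 1) ^ k →
    0 ≤ irootGo fuel n k lo hi ∧ (irootGo fuel n k lo hi) ^ k ≤ n ∧
      n < (irootGo fuel n k lo hi + 1) ^ k := by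
  intro fuel
  induction fuel with
  | zero =>
    intro lo hi hfuel h0 hlh hlo hhi
    have hE : lo = hi := by omega
    simp only [irootGo]
    exact ⟨h0, hlo, by rw [hE]; exact hhi⟩
  | succ fuel ih =>
    intro lo hi hfuel h0 hlh hlo hhi
    by_cases hl : lo < hi
    · have hd := PySem.Int.floordiv_eq_ediv_of_pos (a := lo + hi + 1) (b := 2) (by omega)
      simp only [irootGo, if_pos hl]
      have hm1 : lo < PySem.Int.floordiv (lo + hi + 1) 2 := by rw [hd]; omega
      have hm2 : PySem.Int.floordiv (lo + hi + 1) 2 ≤ hi := by rw [hd]; omega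
      by_cases hle : (PySem.Int.floordiv (lo + hi + 1) 2) ^ k ≤ n
      · rw [if_pos hle]
        exact ih _ hi (by omega) (by omega) hm2 hle hhi
      · rw [if_neg hle]
        have hnlt : n < (PySem.Int.floordiv (lo + hi + 1) 2 - 1 + 1) ^ k := by
          have : n < (PySem.Int.floordiv (lo + hi + 1) 2) ^ k := by omega
          simpa using this
        exact ih lo _ (by omega) h0 (by omega) hlo hnlt
    · have hE : lo = hi := by omega
      simp only [irootGo, if_neg hl]
      exact ⟨h0, hlo, by rw [hE]; exact hhi⟩

lemma iroot_spec (n : Int) (k : Nat) (hn : 0 ≤ n) (hk : k ≠ 0) :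
    0 ≤ iroot n k ∧ (iroot n k) ^ k ≤ n ∧ n < (iroot n k + 1) ^ k := by
  refine irootGo_spec n k hk n.toNat 0 n (by omega) le_rfl hn ?_ ?_
  · simpa [zero_pow hk]
  · have h1 : (1 : Int) ≤ n + 1 := by omega
    have := le_self_pow₀ h1 hk
    omega

lemma iroot_unique (n r : Int) (k : Nat) (hn : 0 ≤ n) (hk : k ≠ 0)
    (hr : 0 ≤ r) (h1 : r ^ k ≤ n) (h2 : n < (r + 1) ^ k) : iroot n k = r := by
  obtain ⟨hq0, hq1, hq2⟩ := iroot_spec n k hn hk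
  by_contra hne
  rcases lt_or_gt_of_ne hne with h | h
  · have : (iroot n k + 1) ^ k ≤ r ^ k := pow_le_pow_left₀ (by omega) (by omega) k
    omega
  · have : (r + 1) ^ k ≤ (iroot n k) ^ k := pow_le_pow_left₀ (by omega) (by omega) k
    omega

lemma le_iroot (n r : Int) (k : Nat) (hn : 0 ≤ n) (hk : k ≠ 0)
    (hr : 0 ≤ r) (h1 : r ^ k ≤ n) : r ≤ iroot n k := by
  obtain ⟨hq0, hq1, hq2⟩ := iroot_spec n k hn hk
  by_contra hlt
  have : (iroot n k + 1) ^ k ≤ r ^ k := pow_le_pow_left₀ (by omega) (by omega) k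
  omega

lemma iroot_step_pow (n : Int) (k : Nat) (hn : 1 ≤ n) (hk : k ≠ 0)
    (h : ∃ r : Int, 1 ≤ r ∧ r ^ k = n) : iroot n k = iroot (n - 1) k + 1 := by
  obtain ⟨r, hr1, hrk⟩ := h
  have ha : iroot n k = r := by
    refine iroot_unique n r k (by omega) hk (by omega) (by omega) ?_
    have : r ^ k < (r + 1) ^ k := pow_lt_pow_left₀ (by omega) (by omega) hk
    omega
  have hb : iroot (n - 1) k = r - 1 := by
    refine iroot_unique (n - 1) (r - 1) k ?_ hk (by omega) ?_ ?_
    · omega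
    · have : (r - 1) ^ k < r ^ k := pow_lt_pow_left₀ (by omega) (by omega) hk
      omega
    · have : (r - 1 + 1) ^ k = r ^ k := by norm_num
      omega
  omega

lemma iroot_step_no (n : Int) (k : Nat) (hn : 1 ≤ n) (hk : k ≠ 0)
    (h : ¬ ∃ r : Int, 1 ≤ r ∧ r ^ k = n) : iroot n k = iroot (n - 1) k := by
  obtain ⟨hq0, hq1, hq2⟩ := iroot_spec n k (by omega) hk
  have hne : (iroot n k) ^ k ≠ n := by
    intro he
    have h1 : 1 ≤ iroot n k := by
      rcases eq_or_lt_of_le hq0 with h0 | h0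
      · rw [← h0] at he; rw [zero_pow hk] at he; omega
      · omega
    exact h ⟨iroot n k, h1, he⟩
  exact (iroot_unique (n - 1) (iroot n k) k (by omega) hk hq0 (by omega) (by omega)).symm

-- a number that is both a square and a cube is a sixth power
lemma nat_sixth (a b : Nat) (ha : 1 ≤ a) (hb : 1 ≤ b) (h : a ^ 2 = b ^ 3) :
    ∃ t : Nat, a = t ^ 3 ∧ b = t ^ 2 := by
  obtain ⟨a', b', hco, ha', hb'⟩ := Nat.exists_coprime a b
  set g := Nat.gcd a b with hg
  have hg1 : 1 ≤ g := by
    have : 0 < Nat.gcd a b := Nat.gcd_pos_of_pos_left b (by omega)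
    omega
  have hkey : a' ^ 2 = b' ^ 3 * g := by
    have h1 : a' ^ 2 * g ^ 2 = (b' ^ 3 * g) * g ^ 2 := by
      have := h
      rw [ha', hb'] at this
      ring_nf at this ⊢
      linarith [this]
    exact Nat.eq_of_mul_eq_mul_right (by positivity) h1
  have hb1 : b' = 1 := by
    have hdvd : b' ∣ a' ^ 2 := ⟨b' ^ 2 * g, by rw [hkey]; ring⟩
    exact (Nat.Coprime.pow_right 2 hco.symm).eq_one_of_dvd hdvd
  refine ⟨a', ?_, ?_⟩
  · rw [ha']
    have : g = a' ^ 2 := by rw [hkey, hb1]; ring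
    rw [this]; ring
  · rw [hb', hb1, hkey, hb1]; ring

lemma sixth_of_sq_cube (n r s : Int) (hr : 1 ≤ r) (hs : 1 ≤ s)
    (hrn : r * r = n) (hsn : s * s * s = n) : ∃ t : Int, 1 ≤ t ∧ t ^ 6 = n := by
  have hrv : ((r.toNat : Int)) = r := Int.toNat_of_nonneg (by omega)
  have hsv : ((s.toNat : Int)) = s := Int.toNat_of_nonneg (by omega)
  have hab : r.toNat ^ 2 = s.toNat ^ 3 := by
    have : (r.toNat : Int) ^ 2 = (s.toNat : Int) ^ 3 := by
      rw [hrv, hsv]; nlinarith [hrn, hsn]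
    exact_mod_cast this
  obtain ⟨t, hta, htb⟩ := nat_sixth r.toNat s.toNat (by omega) (by omega) hab
  refine ⟨(t : Int), ?_, ?_⟩
  · have ht1 : 1 ≤ t := by
      rcases Nat.eq_zero_or_pos t with h0 | h0
      · rw [h0] at hta; simp at hta; omega
      · omega
    exact_mod_cast ht1
  · have : ((t : Int)) ^ 6 = ((r.toNat : Int)) ^ 2 := by
      have : (t ^ 3 : Nat) = r.toNat := hta.symm
      calc ((t : Int)) ^ 6 = (((t ^ 3 : Nat) : Int)) ^ 2 := by push_cast; ring
        _ = ((r.toNat : Int)) ^ 2 := by rw [this]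
    rw [this, hrv]
    nlinarith [hrn]

lemma count_step_mem (n : Int) (hn : 1 ≤ n) (h : inS n) :
    pvCount n = pvCount (n - 1) + 1 := by
  have hsq_of : (∃ r : Int, 1 ≤ r ∧ r * r = n) → ∃ r : Int, 1 ≤ r ∧ r ^ 2 = n := by
    rintro ⟨r, h1, h2⟩; exact ⟨r, h1, by rw [pow_two]; exact h2⟩
  have hcb_of : (∃ s : Int, 1 ≤ s ∧ s * s * s = n) → ∃ s : Int, 1 ≤ s ∧ s ^ 3 = n := by
    rintro ⟨s, h1, h2⟩; exact ⟨s, h1, by rw [show s ^ 3 = s * s * s by ring]; exact h2⟩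
  by_cases hsq : ∃ r : Int, 1 ≤ r ∧ r ^ 2 = n
  · by_cases hcb : ∃ s : Int, 1 ≤ s ∧ s ^ 3 = n
    · -- both: n is a sixth power
      obtain ⟨r, hr1, hr2⟩ := hsq
      obtain ⟨s, hs1, hs2⟩ := hcb
      have hsix : ∃ t : Int, 1 ≤ t ∧ t ^ 6 = n :=
        sixth_of_sq_cube n r s hr1 hs1 (by nlinarith) (by nlinarith)
      have e2 := iroot_step_pow n 2 hn (by norm_num) ⟨r, hr1, hr2⟩
      have e3 := iroot_step_pow n 3 hn (by norm_num) ⟨s, hs1, hs2⟩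
      have e6 := iroot_step_pow n 6 hn (by norm_num) hsix
      unfold pvCount; omega
    · have h6 : ¬ ∃ t : Int, 1 ≤ t ∧ t ^ 6 = n := by
        rintro ⟨t, ht1, ht2⟩
        exact hcb ⟨t ^ 2, one_le_pow₀ ht1, by rw [← ht2]; ring⟩
      have e2 := iroot_step_pow n 2 hn (by norm_num) hsq
      have e3 := iroot_step_no n 3 hn (by norm_num) hcb
      have e6 := iroot_step_no n 6 hn (by norm_num) h6
      unfold pvCount; omega
  · have hcb : ∃ s : Int, 1 ≤ s ∧ s ^ 3 = n := by
      rcases h with hs | hc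
      · exact absurd (hsq_of hs) hsq
      · exact hcb_of hc
    have h6 : ¬ ∃ t : Int, 1 ≤ t ∧ t ^ 6 = n := by
      rintro ⟨t, ht1, ht2⟩
      exact hsq ⟨t ^ 3, one_le_pow₀ ht1, by rw [← ht2]; ring⟩
    have e2 := iroot_step_no n 2 hn (by norm_num) hsq
    have e3 := iroot_step_pow n 3 hn (by norm_num) hcb
    have e6 := iroot_step_no n 6 hn (by norm_num) h6
    unfold pvCount; omega

lemma count_step_no (n : Int) (hn : 1 ≤ n) (h : ¬ inS n) :
    pvCount n = pvCount (n - 1) := by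
  have hsq : ¬ ∃ r : Int, 1 ≤ r ∧ r ^ 2 = n := by
    rintro ⟨r, h1, h2⟩
    exact h (Or.inl ⟨r, h1, by rw [← h2]; ring⟩)
  have hcb : ¬ ∃ s : Int, 1 ≤ s ∧ s ^ 3 = n := by
    rintro ⟨s, h1, h2⟩
    exact h (Or.inr ⟨s, h1, by rw [← h2]; ring⟩)
  have h6 : ¬ ∃ t : Int, 1 ≤ t ∧ t ^ 6 = n := by
    rintro ⟨t, ht1, ht2⟩
    exact hsq ⟨t ^ 3, one_le_pow₀ ht1, by rw [← ht2]; ring⟩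
  have e2 := iroot_step_no n 2 hn (by norm_num) hsq
  have e3 := iroot_step_no n 3 hn (by norm_num) hcb
  have e6 := iroot_step_no n 6 hn (by norm_num) h6
  unfold pvCount; omega

lemma count_mono_aux (d : Nat) : ∀ a : Int, 0 ≤ a → pvCount a ≤ pvCount (a + d) := by
  induction d with
  | zero => intro a _; simp
  | succ d ih =>
    intro a ha
    have h1 := ih a ha
    have hstep : pvCount (a + d) ≤ pvCount (a + d + 1) := by
      by_cases hm : inS (a + d + 1)
      · have := count_step_mem (a + d + 1) (by omega) hm
        simp only [show a + d + 1 - 1 = a + d by ring] at this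
        omega
      · have := count_step_no (a + d + 1) (by omega) hm
        simp only [show a + d + 1 - 1 = a + d by ring] at this
        omega
    calc pvCount a ≤ pvCount (a + d) := h1
      _ ≤ pvCount (a + d + 1) := hstep
      _ = pvCount (a + ((d : Nat) + 1 : Nat)) := by push_cast; ring_nf

lemma count_mono (a b : Int) (ha : 0 ≤ a) (hab : a ≤ b) : pvCount a ≤ pvCount b := by
  have hb : b = a + ((b - a).toNat : Int) := by omega
  rw [hb]
  exact count_mono_aux (b - a).toNat a ha

lemma count_no_gap (a b : Int) (ha : 0 ≤ a) (hab : a ≤ b)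
    (h : ∀ m : Int, a < m → m ≤ b → ¬ inS m) : pvCount b = pvCount a := by
  have aux : ∀ d : Nat, ∀ a : Int, 0 ≤ a → (∀ m : Int, a < m → m ≤ a + d → ¬ inS m) →
      pvCount (a + d) = pvCount a := by
    intro d
    induction d with
    | zero => intro a _ _; simp
    | succ d ih =>
      intro a ha hgap
      have h1 : pvCount (a + d + 1) = pvCount (a + d) := by
        have := count_step_no (a + d + 1) (by omega)
          (hgap (a + d + 1) (by omega) (by push_cast; omega))
        simpa [show a + d + 1 - 1 = a + d by ring] using this
      have h2 := ih a ha (fun m hm1 hm2 => hgap m hm1 (by push_cast; omega))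
      calc pvCount (a + ((d : Nat) + 1 : Nat)) = pvCount (a + d + 1) := by push_cast; ring_nf
        _ = pvCount (a + d) := h1
        _ = pvCount a := h2
  have hb : b = a + ((b - a).toNat : Int) := by omega
  rw [hb]
  exact aux (b - a).toNat a ha (fun m hm1 hm2 => h m hm1 (by omega))

lemma count_zero : pvCount 0 = 0 := by
  have h : ∀ k : Nat, iroot 0 k = 0 := by
    intro k
    simp [iroot, irootGo]
  unfold pvCount
  rw [h 2, h 3, h 6]
  norm_num

lemma count_xsq (x : Int) (hx : 1 ≤ x) : x ≤ pvCount (x * x) := by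
  have h2 : iroot (x * x) 2 = x := by
    refine iroot_unique (x * x) x 2 (by positivity) (by norm_num) (by omega) (by nlinarith) (by nlinarith)
  have h36 : iroot (x * x) 6 ≤ iroot (x * x) 3 := by
    obtain ⟨h60, h61, _⟩ := iroot_spec (x * x) 6 (by positivity) (by norm_num)
    refine le_iroot (x * x) (iroot (x * x) 6) 3 (by positivity) (by norm_num) h60 ?_
    rcases eq_or_lt_of_le h60 with h0 | h0
    · rw [← h0]; positivity
    · have := pow_le_pow_right₀ (a := iroot (x * x) 6) (by omega) (show 3 ≤ 6 by norm_num)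
      omega
  unfold pvCount
  omega

lemma cube_le_cube {a b : Int} (ha : 0 ≤ a) (hab : a ≤ b) : a * a * a ≤ b * b * b := by
  have h1 : a * a ≤ b * b := mul_le_mul hab hab ha (by omega)
  exact mul_le_mul h1 hab ha (mul_nonneg (by omega) (by omega))

-- A's loop invariant
set_option maxHeartbeats 1600000 in
lemma findCxLoop_spec (x : Int) (hx : 1 ≤ x) :
    ∀ (fuel : Nat) (i j k res : Int),
    (x - k + 1).toNat * 2 + (if i*i = j*j*j then 1 else 0) ≤ fuel →
    1 ≤ i → 1 ≤ j → k ≤ x + 1 →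
    (j-1)*(j-1)*(j-1) < i*i → (i-1)*(i-1) ≤ j*j*j →
    pvCount (min (i*i) (j*j*j) - 1) = k - 1 →
    (2 ≤ k → inS res ∧ pvCount res = k - 1 ∧ res < min (i*i) (j*j*j)) →
    inS (findCxLoop fuel x i j k res) ∧ pvCount (findCxLoop fuel x i j k res) = x := by
  intro fuel
  induction fuel with
  | zero =>
    intro i j k res hfuel hi1 hj1 hk hI3a hI3b hI2 hres
    have h2 : (x - k + 1).toNat * 2 ≤ 0 := le_trans (Nat.le_add_right _ _) hfuel
    simp only [findCxLoop]
    obtain ⟨ha, hb, _⟩ := hres (by omega)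
    exact ⟨ha, by omega⟩
  | succ fuel ih =>
    intro i j k res hfuel hi1 hj1 hk hI3a hI3b hI2 hres
    by_cases hkx : k ≤ x
    · by_cases heq : i*i = j*j*j
      · simp only [findCxLoop, if_pos hkx, if_pos heq]
        rw [if_pos heq] at hfuel
        have hne : ¬((i+1)*(i+1) = j*j*j) := by
          intro h
          have h2 : (i+1)*(i+1) = i*i := h.trans heq.symm
          have h3 : i*2 + 1 = 0 := by nlinarith [h2]
          omega
        have hsq : i*i ≤ (i+1)*(i+1) := by nlinarith
        have hlt : j*j*j < (i+1)*(i+1) := by nlinarith [heq]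
        have hminO : min (i*i) (j*j*j) = j*j*j := by rw [heq, min_self]
        have hminN : min ((i+1)*(i+1)) (j*j*j) = j*j*j := min_eq_right (le_of_lt hlt)
        refine ih (i+1) j k res ?_ (by omega) hj1 hk (by linarith) ?_ ?_ ?_
        · rw [if_neg hne]
          omega
        · have : (i+1-1)*(i+1-1) = i*i := by ring
          rw [this, heq]
        · rw [hminN]
          rw [hminO] at hI2
          exact hI2
        · intro h2
          obtain ⟨ha, hb, hc⟩ := hres h2
          rw [hminO] at hc
          rw [hminN]
          exact ⟨ha, hb, hc⟩
      · by_cases hlt : i*i < j*j*j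
        · simp only [findCxLoop, if_pos hkx, if_neg heq, if_pos hlt]
          have hA2 : (x - k + 1).toNat * 2 ≤ fuel + 1 := le_trans (Nat.le_add_right _ _) hfuel
          have hii1 : i*i < (i+1)*(i+1) := by nlinarith
          have hmgt : i*i < min ((i+1)*(i+1)) (j*j*j) := lt_min hii1 hlt
          have hminO : min (i*i) (j*j*j) = i*i := min_eq_left (le_of_lt hlt)
          have hii0 : (1:Int) ≤ i*i := by nlinarith
          have hgap : pvCount (min ((i+1)*(i+1)) (j*j*j) - 1) = pvCount (i*i) := by
            refine count_no_gap (i*i) (min ((i+1)*(i+1)) (j*j*j) - 1) (by nlinarith) (by omega) ?_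
            intro m hm1 hm2 hin
            have hmA : m < (i+1)*(i+1) := by
              have := min_le_left ((i+1)*(i+1)) (j*j*j)
              omega
            have hmB : m < j*j*j := by
              have := min_le_right ((i+1)*(i+1)) (j*j*j)
              omega
            rcases hin with ⟨r, hr1, hrn⟩ | ⟨sv, hs1, hsn⟩
            · have hri : i < r := by
                by_contra hc
                push_neg at hc
                have : r * r ≤ i * i := by nlinarith
                omega
              have : (i+1)*(i+1) ≤ r*r := by nlinarith
              omega
            · have hsj : sv < j := by
                by_contra hc
                push_neg at hc
                have := cube_le_cube (show (0:Int) ≤ j by omega) hc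
                omega
              have h2 : sv*sv*sv ≤ (j-1)*(j-1)*(j-1) := cube_le_cube (by omega) (by omega)
              omega
          have hstep : pvCount (i*i) = pvCount (i*i - 1) + 1 :=
            count_step_mem (i*i) hii0 (Or.inl ⟨i, hi1, rfl⟩)
          rw [hminO] at hI2
          refine ih (i+1) j (k+1) (i*i) ?_ (by omega) hj1 (by omega) (by linarith) ?_ ?_ ?_
          · have hite : (if (i+1)*(i+1) = j*j*j then (1:Nat) else 0) ≤ 1 := by
              split <;> omega
            omega
          · have : (i+1-1)*(i+1-1) = i*i := by ring
            rw [this]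
            exact le_of_lt hlt
          · rw [hgap, hstep, hI2]
            ring
          · intro _
            refine ⟨Or.inl ⟨i, hi1, rfl⟩, ?_, hmgt⟩
            rw [hstep, hI2]
            ring
        · simp only [findCxLoop, if_pos hkx, if_neg heq, if_neg hlt]
          have hA2 : (x - k + 1).toNat * 2 ≤ fuel + 1 := le_trans (Nat.le_add_right _ _) hfuel
          have hgt : j*j*j < i*i := by
            rcases lt_or_eq_of_le (not_lt.mp hlt) with h | h
            · exact h
            · exact absurd h.symm heq
          have hjj1 : j*j*j < (j+1)*(j+1)*(j+1) := by nlinarith [sq_nonneg j, hj1]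
          have hmgt : j*j*j < min (i*i) ((j+1)*(j+1)*(j+1)) := lt_min hgt hjj1
          have hminO : min (i*i) (j*j*j) = j*j*j := min_eq_right (le_of_lt hgt)
          have hjj0 : (1:Int) ≤ j*j*j := by nlinarith
          have hgap : pvCount (min (i*i) ((j+1)*(j+1)*(j+1)) - 1) = pvCount (j*j*j) := by
            refine count_no_gap (j*j*j) (min (i*i) ((j+1)*(j+1)*(j+1)) - 1) (by nlinarith) (by omega) ?_
            intro m hm1 hm2 hin
            have hmA : m < i*i := by
              have := min_le_left (i*i) ((j+1)*(j+1)*(j+1))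
              omega
            have hmB : m < (j+1)*(j+1)*(j+1) := by
              have := min_le_right (i*i) ((j+1)*(j+1)*(j+1))
              omega
            rcases hin with ⟨r, hr1, hrn⟩ | ⟨sv, hs1, hsn⟩
            · have hri : r < i := by
                by_contra hc
                push_neg at hc
                have : i * i ≤ r * r := by nlinarith
                omega
              have h1 : r*r ≤ (i-1)*(i-1) := by nlinarith
              omega
            · have hsj : j < sv := by
                by_contra hc
                push_neg at hc
                have := cube_le_cube (show (0:Int) ≤ sv by omega) hc
                omega
              have h2 : (j+1)*(j+1)*(j+1) ≤ sv*sv*sv := cube_le_cube (by omega) (by omega)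
              omega
          have hstep : pvCount (j*j*j) = pvCount (j*j*j - 1) + 1 :=
            count_step_mem (j*j*j) hjj0 (Or.inr ⟨j, hj1, rfl⟩)
          rw [hminO] at hI2
          refine ih i (j+1) (k+1) (j*j*j) ?_ hi1 (by omega) (by omega) ?_ ?_ ?_ ?_
          · have hite : (if i*i = (j+1)*((j+1)*(j+1)) then (1:Nat) else 0) ≤ 1 := by
              split <;> omega
            have hite2 : (if i*i = (j+1)*(j+1)*((j+1)) then (1:Nat) else 0) ≤ 1 := by
              split <;> omega
            have hite3 : (if i*i = (j+1)*(j+1)*(j+1) then (1:Nat) else 0) ≤ 1 := by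
              split <;> omega
            omega
          · have : (j+1-1)*(j+1-1)*(j+1-1) = j*j*j := by ring
            rw [this]
            exact hgt
          · have hmono : j*j*j ≤ (j+1)*(j+1)*(j+1) := le_of_lt hjj1
            linarith
          · rw [hgap, hstep, hI2]
            ring
          · intro _
            refine ⟨Or.inr ⟨j, hj1, rfl⟩, ?_, hmgt⟩
            rw [hstep, hI2]
            ring
    · simp only [findCxLoop, if_neg hkx]
      obtain ⟨ha, hb, _⟩ := hres (by omega)
      exact ⟨ha, by omega⟩

-- B's binary search returns the least n with count(n) >= x
lemma findCxGo_eq (x L : Int) (hL : x ≤ pvCount L) (hL1 : 1 ≤ L) :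
    ∀ (fuel : Nat) (lo hi : Int), (hi - lo).toNat ≤ fuel → 1 ≤ lo → lo ≤ L → L ≤ hi →
    (∀ m : Int, lo ≤ m → m < L → pvCount m < x) → findCxGo fuel x lo hi = L := by
  intro fuel
  induction fuel with
  | zero =>
    intro lo hi hfuel h1 h2 h3 _
    simp only [findCxGo]
    omega
  | succ fuel ih =>
    intro lo hi hfuel h1 h2 h3 hmin
    by_cases hl : lo < hi
    · have hd := PySem.Int.floordiv_eq_ediv_of_pos (a := lo + hi) (b := 2) (by omega)
      simp only [findCxGo, if_pos hl]
      have hm1 : lo ≤ PySem.Int.floordiv (lo + hi) 2 := by rw [hd]; omega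
      have hm2 : PySem.Int.floordiv (lo + hi) 2 < hi := by rw [hd]; omega
      by_cases hle : x ≤ pvCount (PySem.Int.floordiv (lo + hi) 2)
      · rw [if_pos hle]
        have hLm : L ≤ PySem.Int.floordiv (lo + hi) 2 := by
          by_contra hc
          push_neg at hc
          have := hmin _ hm1 hc
          omega
        exact ih lo _ (by omega) h1 h2 hLm hmin
      · rw [if_neg hle]
        have hmL : PySem.Int.floordiv (lo + hi) 2 < L := by
          by_contra hc
          push_neg at hc
          have := count_mono L _ (by omega) hc
          omega
        refine ih (PySem.Int.floordiv (lo + hi) 2 + 1) hi (by omega) (by omega) (by omega) h3 ?_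
        intro m hma hmb
        exact hmin m (by omega) hmb
    · simp only [findCxGo, if_neg hl]
      omega

-- ===== VERDICT (by name: the statement is the Claim_ definition above) =====
theorem findCx_spec : Claim_equal_findCx := by
  intro x _ hpre
  unfold Spec_findCx
  have hx : 1 ≤ x := hpre
  have hinit : pvCount (min ((1:Int)*1) ((1:Int)*1*1) - 1) = 1 - 1 := by
    norm_num [count_zero]
  have hres0 : (2:Int) ≤ 1 → inS 0 ∧ pvCount 0 = 1 - 1 ∧ (0:Int) < min ((1:Int)*1) ((1:Int)*1*1) := by
    intro h
    exact absurd h (by norm_num)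
  have hfuel : (x - 1 + 1).toNat * 2 + (if (1:Int)*1 = 1*1*1 then 1 else 0) ≤ (2*(x+1)).toNat := by
    have h11 : ((1:Int)*1 = 1*1*1) := by norm_num
    rw [if_pos h11]
    omega
  obtain ⟨hS, hc⟩ := findCxLoop_spec x hx (2*(x+1)).toNat 1 1 1 0 hfuel le_rfl le_rfl (by omega)
    (by norm_num) (by norm_num) hinit hres0
  set L := findCxLoop (2*(x+1)).toNat x 1 1 1 0 with hLdef
  have hL1 : 1 ≤ L := inS_one_le hS
  have hstep : pvCount L = pvCount (L - 1) + 1 := count_step_mem L hL1 hS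
  have hmin : ∀ m : Int, 1 ≤ m → m < L → pvCount m < x := by
    intro m hm1 hmL
    have := count_mono m (L - 1) (by omega) (by omega)
    omega
  have hLxx : L ≤ x * x := by
    by_contra hgt
    push_neg at hgt
    have h1 := hmin (x * x) (by nlinarith) hgt
    have h2 := count_xsq x hx
    omega
  have halt : findCx_alt x = L := by
    unfold findCx_alt
    exact findCxGo_eq x L (by omega) hL1 (x * x - 1).toNat 1 (x * x) (by omega) le_rfl hL1 hLxx
      (fun m h1 h2 => hmin m h1 h2)
  show findCx x = findCx_alt x
  rw [halt]
  unfold findCx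
  exact hLdef.symm
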